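-- pv_equiv track=rewrite | github.com/FABIANB3TANCOUR/SLD | sld_practice.py | calcular_suma_gastos
-- ===== SOURCE A (Python) =====
-- def calcular_suma_gastos(gastos_hechos, valores):
--     """Calcula la suma total de gastos monetarios."""
--     suma = 0
--     for tipo_gasto in gastos_hechos["gastos"].values():
--         for gasto, prioridad in tipo_gasto.items():
--             # Para manejar el formato "media/alta"
--             if "/" in prioridad:
--                 prioridad = prioridad.split('/')[0] # Usaremos el primero como dominante (media)
--
--             # USe obtiene el valor asociado al hecho (prioridad)
--             valor_gasto = valores.get(prioridad, 0)
--             suma += valor_gasto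
--     return suma
-- ===== SOURCE B (Python) =====
-- def calcular_suma_gastos(gastos_hechos, valores):
--     """Calcula la suma total de gastos monetarios (recursion por tipo de gasto;
--     la normalizacion toma siempre el primer token de split('/'))."""
--     def total(tipos):
--         if not tipos:
--             return 0
--         primero = tipos[0]
--         return sum(valores.get(p.split('/')[0], 0) for p in primero.values()) + total(tipos[1:])
--     return total(list(gastos_hechos["gastos"].values()))
-- ===== Notes on version B (the rewrite author's own statement) =====
-- stated objective: alternative
-- what changed: B replaces A's nested accumulator loops and per-expense conditional '/'-check by a recursion over the list of expense types that sums a generator per type, normalizing every priority unconditionally as p.split('/')[0].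
import Mathlib
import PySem

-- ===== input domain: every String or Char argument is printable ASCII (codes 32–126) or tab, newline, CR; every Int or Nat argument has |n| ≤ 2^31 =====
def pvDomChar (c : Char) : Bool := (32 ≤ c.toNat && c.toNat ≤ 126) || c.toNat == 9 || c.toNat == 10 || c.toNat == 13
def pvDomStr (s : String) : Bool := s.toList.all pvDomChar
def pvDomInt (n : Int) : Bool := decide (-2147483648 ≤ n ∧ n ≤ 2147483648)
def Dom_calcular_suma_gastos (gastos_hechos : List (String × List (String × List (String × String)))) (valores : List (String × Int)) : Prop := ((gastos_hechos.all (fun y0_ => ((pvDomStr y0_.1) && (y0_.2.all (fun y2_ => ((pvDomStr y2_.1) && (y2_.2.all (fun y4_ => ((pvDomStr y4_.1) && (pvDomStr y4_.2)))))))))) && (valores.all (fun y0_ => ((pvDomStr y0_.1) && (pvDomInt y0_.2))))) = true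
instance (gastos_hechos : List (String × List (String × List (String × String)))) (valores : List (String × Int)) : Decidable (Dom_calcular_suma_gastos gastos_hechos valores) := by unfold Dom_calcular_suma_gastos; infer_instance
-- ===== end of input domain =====

-- B replaces A's nested fold with per-expense conditional normalization by a recursion over
-- the expense types that sums per-type value lists, normalizing unconditionally via split('/')[0]
-- (alternative decomposition, same results).


-- ===== PORT A =====

def calcular_suma_gastos (gastos_hechos : List (String × List (String × List (String × String)))) (valores : List (String × Int)) : Int :=
  match (PySem.Dict.ofList gastos_hechos).get? "gastos" with
  | none => 0  -- KeyError 'gastos': excluded by Pre_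
  | some tipos =>
    ((PySem.Dict.ofList tipos).values).foldl (fun suma tipo_gasto =>
      ((PySem.Dict.ofList tipo_gasto).items).foldl (fun suma pr =>
        -- if "/" in prioridad: prioridad = prioridad.split('/')[0]
        let prioridad :=
          if PySem.Str.isIn "/" pr.2 then ((PySem.Str.split? pr.2 "/").getD []).headI else pr.2
        suma + (PySem.Dict.ofList valores).getD prioridad 0) suma) 0

-- ===== PORT B =====

-- inner generator: sum(valores.get(p.split('/')[0], 0) for p in primero.values())
def pvSumaTipo (valores : List (String × Int)) (primero : List (String × String)) : Int :=
  (((PySem.Dict.ofList primero).values).map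
    (fun p => (PySem.Dict.ofList valores).getD (((PySem.Str.split? p "/").getD []).headI) 0)).sum

-- def total(tipos): recursion on the list of expense types
def pvTotal (valores : List (String × Int)) : List (List (String × String)) → Int
  | [] => 0
  | primero :: resto => pvSumaTipo valores primero + pvTotal valores resto

def calcular_suma_gastos_alt (gastos_hechos : List (String × List (String × List (String × String)))) (valores : List (String × Int)) : Int :=
  -- gastos_hechos["gastos"] would raise KeyError when absent (excluded by Pre_); getD [] stands in there
  pvTotal valores ((PySem.Dict.ofList ((PySem.Dict.ofList gastos_hechos).getD "gastos" [])).values)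

-- ===== PRECONDITION & SPEC =====
-- A (and B) raise KeyError exactly when the key "gastos" is absent; those inputs are excluded.
def Pre_calcular_suma_gastos (gastos_hechos : List (String × List (String × List (String × String)))) (valores : List (String × Int)) : Prop :=
  (PySem.Dict.ofList gastos_hechos).contains "gastos" = true
instance (gastos_hechos : List (String × List (String × List (String × String)))) (valores : List (String × Int)) : Decidable (Pre_calcular_suma_gastos gastos_hechos valores) := by unfold Pre_calcular_suma_gastos; infer_instance
def pvWitness_calcular_suma_gastos : (List (String × List (String × List (String × String)))) × (List (String × Int)) :=
  ([("gastos", [("casa", [("luz", "alta"), ("agua", "media/alta")])])], [("alta", 3), ("media", 2)])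

def Spec_calcular_suma_gastos (gastos_hechos : List (String × List (String × List (String × String)))) (valores : List (String × Int)) (out : Int) : Prop := out = calcular_suma_gastos_alt gastos_hechos valores
instance (gastos_hechos : List (String × List (String × List (String × String)))) (valores : List (String × Int)) (out : Int) : Decidable (Spec_calcular_suma_gastos gastos_hechos valores out) := by unfold Spec_calcular_suma_gastos; infer_instance

-- ===== CLAIM (what is proved, stated in full; the proofs are below) =====
def Claim_equal_calcular_suma_gastos : Prop := ∀ (gastos_hechos : List (String × List (String × List (String × String)))) (valores : List (String × Int)), Dom_calcular_suma_gastos gastos_hechos valores → Pre_calcular_suma_gastos gastos_hechos valores → Spec_calcular_suma_gastos gastos_hechos valores (calcular_suma_gastos gastos_hechos valores)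

-- ===== LEMMAS AND PROOFS =====

-- splitting on a separator that does not occur returns the whole list as the single piece
theorem pv_splitOn_go_no_sep (sep : List Char) (fuel : Nat) (l cur : List Char)
    (acc : List (List Char)) (h : ¬ sep <:+: l) :
    PySem.Chars.splitOn.go sep fuel l cur acc = ((cur.reverse ++ l) :: acc).reverse := by
  induction fuel generalizing l cur with
  | zero => rfl
  | succ fuel ih =>
    cases l with
    | nil => simp [PySem.Chars.splitOn.go]
    | cons c rest =>
      have hpre : sep.isPrefixOf (c :: rest) = false := by
        by_contra hp
        exact h ((List.isPrefixOf_iff_prefix.mp (by simpa using hp)).isInfix)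
      have hrest : ¬ sep <:+: rest := fun hi => h (hi.trans (List.suffix_cons c rest).isInfix)
      rw [PySem.Chars.splitOn.go, hpre]
      simp only [Bool.false_eq_true, if_false]
      rw [ih rest (c :: cur) hrest]
      simp

theorem pv_splitOn_no_sep (s sep : List Char) (h : PySem.Chars.isIn sep s = false) :
    PySem.Chars.splitOn s sep = [s] := by
  rw [PySem.Chars.splitOn,
    pv_splitOn_go_no_sep sep (s.length + 1) s [] [] ((PySem.Chars.isIn_eq_false_iff sep s).mp h)]
  simp

-- the two normalizations agree: unconditional split('/')[0] equals A's conditional form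
theorem pv_norm_eq (p : String) :
    (if PySem.Str.isIn "/" p then ((PySem.Str.split? p "/").getD []).headI else p)
      = ((PySem.Str.split? p "/").getD []).headI := by
  by_cases h : PySem.Str.isIn "/" p
  · rw [if_pos h]
  · rw [if_neg h]
    have hc : PySem.Chars.isIn ['/'] p.toList = false := by
      simpa [PySem.Str.isIn] using h
    have hs : PySem.Chars.split? p.toList ['/'] = some [p.toList] := by
      rw [PySem.Chars.split?]
      simp [pv_splitOn_no_sep p.toList ['/'] hc]
    simp [PySem.Str.split?, hs]

theorem pv_foldl_add_sum {α : Type} (l : List α) (f : α → Int) (a : Int) :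
    l.foldl (fun acc x => acc + f x) a = a + (l.map f).sum := by
  induction l generalizing a with
  | nil => simp
  | cons x xs ih => simp only [List.foldl_cons, List.map_cons, List.sum_cons, ih]; omega

-- A's inner fold over one expense type equals B's per-type sum
theorem pv_inner_eq (valores : List (String × Int)) (t : List (String × String)) (a : Int) :
    ((PySem.Dict.ofList t).items).foldl (fun suma pr =>
        let prioridad :=
          if PySem.Str.isIn "/" pr.2 then ((PySem.Str.split? pr.2 "/").getD []).headI else pr.2
        suma + (PySem.Dict.ofList valores).getD prioridad 0) a
      = a + pvSumaTipo valores t := by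
  have hfun : (fun (suma : Int) (pr : String × String) =>
      let prioridad :=
        if PySem.Str.isIn "/" pr.2 then ((PySem.Str.split? pr.2 "/").getD []).headI else pr.2
      suma + (PySem.Dict.ofList valores).getD prioridad 0)
      = fun suma pr =>
        suma + (PySem.Dict.ofList valores).getD (((PySem.Str.split? pr.2 "/").getD []).headI) 0 := by
    funext s pr
    simp only [pv_norm_eq]
  rw [hfun, pv_foldl_add_sum ((PySem.Dict.ofList t).items)
      (fun pr => (PySem.Dict.ofList valores).getD (((PySem.Str.split? pr.2 "/").getD []).headI) 0) a,
    pvSumaTipo, PySem.Dict.values, List.map_map]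
  rfl

-- A's outer fold equals B's recursion
theorem pv_outer_eq (valores : List (String × Int)) (L : List (List (String × String))) (a : Int) :
    L.foldl (fun suma tipo_gasto =>
      ((PySem.Dict.ofList tipo_gasto).items).foldl (fun suma pr =>
        let prioridad :=
          if PySem.Str.isIn "/" pr.2 then ((PySem.Str.split? pr.2 "/").getD []).headI else pr.2
        suma + (PySem.Dict.ofList valores).getD prioridad 0) suma) a
      = a + pvTotal valores L := by
  induction L generalizing a with
  | nil => simp [pvTotal]
  | cons t rest ih =>
    rw [List.foldl_cons, ih, pv_inner_eq, pvTotal]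
    omega

theorem calcular_suma_gastos_eq (gastos_hechos : List (String × List (String × List (String × String)))) (valores : List (String × Int))
    (hpre : Pre_calcular_suma_gastos gastos_hechos valores) :
    calcular_suma_gastos gastos_hechos valores = calcular_suma_gastos_alt gastos_hechos valores := by
  unfold calcular_suma_gastos calcular_suma_gastos_alt
  unfold Pre_calcular_suma_gastos at hpre
  cases h : (PySem.Dict.ofList gastos_hechos).get? "gastos" with
  | none =>
    exfalso
    rw [PySem.Dict.contains_eq_isSome_get?, h] at hpre
    simp at hpre
  | some tipos =>
    rw [PySem.Dict.getD, h]
    simpa using pv_outer_eq valores ((PySem.Dict.ofList tipos).values) 0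

-- ===== VERDICT (by name: the statement is the Claim_ definition above) =====
theorem calcular_suma_gastos_spec : Claim_equal_calcular_suma_gastos := by
  intro gh v _ hpre
  unfold Spec_calcular_suma_gastos
  exact calcular_suma_gastos_eq gh v hpre
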